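-- pv_equiv track=rewrite | github.com/ericstubley/advent-of-code | 2016/07/puzzle_2016_07.py | ssl_support
-- ===== SOURCE A (Python) =====
-- def ssl_support(ip):
--     ret = False
--     paren_stack = []
--     super_patterns, hyper_patterns = set(), set()
--     for i, c in enumerate(ip[:-2]):
--         if c == '[':
--             paren_stack.append(c)
--         elif c == ']':
--             paren_stack.pop()
--         else:
--             extract = ip[i:i+3]
--             if extract.isalpha() and extract[0] != extract[1] and extract[0] == extract[2]:
--                 if len(paren_stack) > 0:
--                     if invert_pattern(extract) in super_patterns:
--                         ret = True
--                         break
--                     hyper_patterns.add(extract)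
--                 else:
--                     if invert_pattern(extract) in hyper_patterns:
--                         ret = True
--                         break
--                     super_patterns.add(extract)
--     return ret
--
-- def invert_pattern(s):
--     # s is of the form ABA, return BAB
--     return "".join([s[1], s[0], s[1]])
-- ===== SOURCE B (Python) =====
-- def ssl_support(ip):
--     # Phase 1: parse the address into supernet (outside brackets) and hypernet
--     # (inside brackets) segments by splitting on the bracket characters.
--     supers, hypers = [], []
--     seg = []
--     depth = 0
--     for c in ip:
--         if c in '[]':
--             (hypers if depth > 0 else supers).append(''.join(seg))
--             seg = []
--             depth += 1 if c == '[' else -1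
--         else:
--             seg.append(c)
--     (hypers if depth > 0 else supers).append(''.join(seg))
--
--     # Phase 2: collect the ABA triples occurring in a family of segments.
--     def abas(segments):
--         found = set()
--         for s in segments:
--             for k in range(len(s) - 2):
--                 t = s[k:k+3]
--                 if t.isalpha() and t[0] != t[1] and t[0] == t[2]:
--                     found.add(t)
--         return found
--
--     hyper = abas(hypers)
--     return any(t[1] + t[0] + t[1] in hyper for t in abas(supers))
-- ===== Notes on version B (the rewrite author's own statement) =====
-- stated objective: simpler
-- what changed: Replaces A's single interleaved scan of the raw string (explicit bracket stack, per-position slice, early break) by a parse-then-scan decomposition: first split the address into supernet and hypernet segment strings on the bracket characters, then scan each segment family separately for ABA triples and finally test whether some supernet ABA's inversion lies in the hypernet set.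
-- outside the precondition, e.g. on ssl_support(']]xx'): A raises IndexError, B returns False; on ssl_support('aba[bab]]xyz'): A returns True, B returns True
import Mathlib
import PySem

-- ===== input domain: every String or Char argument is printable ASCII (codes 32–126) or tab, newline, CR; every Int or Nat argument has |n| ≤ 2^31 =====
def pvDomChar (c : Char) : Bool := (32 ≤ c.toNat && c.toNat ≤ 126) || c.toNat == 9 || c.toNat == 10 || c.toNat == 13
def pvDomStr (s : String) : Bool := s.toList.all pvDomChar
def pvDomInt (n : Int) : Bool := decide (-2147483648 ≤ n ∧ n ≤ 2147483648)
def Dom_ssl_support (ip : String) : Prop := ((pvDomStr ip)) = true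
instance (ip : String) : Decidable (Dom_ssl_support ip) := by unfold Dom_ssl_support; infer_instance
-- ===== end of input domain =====

-- B replaces A's single interleaved early-break scan of the raw string (explicit bracket stack,
-- per-position slice) by a parse-then-scan decomposition: split the address into supernet and
-- hypernet segment strings on the brackets, then scan each segment family for ABA triples and
-- compare the two sets (objective: simpler).

-- ===== PORT A =====
-- invert_pattern(s) = "".join([s[1], s[0], s[1]]); only ever called on length-3 ABA extracts
-- (shorter input, where Python would raise, is unreachable from ssl_support).
def invert_pattern (s : List Char) : List Char :=
  match s with
  | x :: y :: _ => [y, x, y]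
  | _ => []

-- extract.isalpha() and extract[0] != extract[1] and extract[0] == extract[2];
-- getD's default is unreachable: isalpha of "" is false and the extract always has length 3 here.
def abaTest (s : List Char) : Bool :=
  PySem.Chars.strIsalpha s && !(s.getD 0 ' ' == s.getD 1 ' ') && (s.getD 0 ' ' == s.getD 2 ' ')

-- the for-loop over enumerate(ip[:-2]) with early break (break ⇒ result True);
-- Pre_ssl_support excludes the inputs where paren_stack.pop() raises, so dropLast on [] is unreachable.
def aLoop (l : List Char) (stack : List Char) (sup hyp : PySem.Set (List Char)) :
    List (Int × Char) → Bool
  | [] => false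
  | (i, c) :: rest =>
    if c = '[' then aLoop l (stack ++ [c]) sup hyp rest
    else if c = ']' then aLoop l stack.dropLast sup hyp rest
    else
      let ex := PySem.List.slice l (some i) (some (i + 3))
      if abaTest ex then
        if stack.length > 0 then
          if PySem.Set.contains sup (invert_pattern ex) then true
          else aLoop l stack sup (PySem.Set.add hyp ex) rest
        else
          if PySem.Set.contains hyp (invert_pattern ex) then true
          else aLoop l stack (PySem.Set.add sup ex) hyp rest
      else aLoop l stack sup hyp rest

def ssl_support (ip : String) : Bool :=
  aLoop ip.toList [] PySem.Set.empty PySem.Set.empty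
    (PySem.List.enumerate (PySem.List.slice ip.toList none (some (-2))) 0)

-- ===== PORT B =====
-- phase 1 of Source B: split the address into supernet/hypernet segment lists on the brackets
def segSplit (supers hypers : List (List Char)) (seg : List Char) (depth : Int) :
    List Char → List (List Char) × List (List Char)
  | [] => if depth > 0 then (supers, hypers ++ [seg]) else (supers ++ [seg], hypers)
  | c :: rest =>
    if c = '[' ∨ c = ']' then
      if depth > 0 then
        segSplit supers (hypers ++ [seg]) [] (depth + (if c = '[' then 1 else -1)) rest
      else
        segSplit (supers ++ [seg]) hypers [] (depth + (if c = '[' then 1 else -1)) rest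
    else segSplit supers hypers (seg ++ [c]) depth rest

-- phase 2 of Source B: the set of ABA triples occurring inside a family of segments
def segAbas (segments : List (List Char)) : PySem.Set (List Char) :=
  segments.foldl (fun found s =>
    (PySem.List.pyRange 0 ((s.length : Int) - 2) 1).foldl (fun found k =>
      let t := PySem.List.slice s (some k) (some (k + 3))
      if PySem.Chars.strIsalpha t && !(t.getD 0 ' ' == t.getD 1 ' ') && (t.getD 0 ' ' == t.getD 2 ' ')
      then PySem.Set.add found t else found) found) PySem.Set.empty

-- any(t[1] + t[0] + t[1] in hyper for t in abas(supers)); t always has length 3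
def ssl_support_alt (ip : String) : Bool :=
  let r := segSplit [] [] [] 0 ip.toList
  let hyper := segAbas r.2
  (segAbas r.1).any (fun t => PySem.Set.contains hyper [t.getD 1 ' ', t.getD 0 ' ', t.getD 1 ' '])

-- ===== PRECONDITION & SPEC =====
-- Pre_ excludes inputs with an unmatched ']' within ip[:-2]: there A either raises IndexError on
-- paren_stack.pop() or (if it breaks with True first) returns before reaching the bad ']'.
def Pre_ssl_support (ip : String) : Prop :=
  ∀ i : Nat, i < ip.toList.length - 2 → ip.toList.getD i ' ' = ']' →
    (ip.toList.take i).count ']' < (ip.toList.take i).count '['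
instance (ip : String) : Decidable (Pre_ssl_support ip) := by unfold Pre_ssl_support; infer_instance

def pvWitness_ssl_support : String := "aba[bab]xx"

def Spec_ssl_support (ip : String) (out : Bool) : Prop := out = ssl_support_alt ip
instance (ip : String) (out : Bool) : Decidable (Spec_ssl_support ip out) := by unfold Spec_ssl_support; infer_instance

-- ===== CLAIM (what is proved, stated in full; the proofs are below) =====
def Claim_equal_ssl_support : Prop := ∀ (ip : String), Dom_ssl_support ip → Pre_ssl_support ip → Spec_ssl_support ip (ssl_support ip)

-- ===== LEMMAS AND PROOFS =====

-- bracket depth after the first j characters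
def depthAt (l : List Char) (j : Nat) : Int :=
  ((l.take j).count '[' : Int) - ((l.take j).count ']' : Int)

-- the (clamped) length-3 substring of l starting at i
def tripleAt (l : List Char) (i : Nat) : List Char := (l.drop i).take 3

-- "some ABA triple of the supernet (resp. hypernet) part at a position ≥ j equals t"
def okSup (l : List Char) (j : Nat) (t : List Char) : Prop :=
  ∃ i : Nat, j ≤ i ∧ i + 2 < l.length ∧ t = tripleAt l i ∧ abaTest (tripleAt l i) = true ∧ depthAt l i ≤ 0

def okHyp (l : List Char) (j : Nat) (t : List Char) : Prop :=
  ∃ i : Nat, j ≤ i ∧ i + 2 < l.length ∧ t = tripleAt l i ∧ abaTest (tripleAt l i) = true ∧ 0 < depthAt l i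

-- every element the loops store is an ABA triple [x, y, x]
def Sh (s : List Char) : Prop := ∃ x y, s = [x, y, x]

-- loop invariant: both sets hold ABA triples only and no cross match has occurred yet
def SInv (sup hyp : PySem.Set (List Char)) : Prop :=
  (∀ a ∈ sup, Sh a) ∧ (∀ b ∈ hyp, Sh b) ∧ (∀ a ∈ sup, invert_pattern a ∉ hyp)

-- proof-internal flat scan: A's pass without the early break, collecting both sets in full
def bLoop (l : List Char) (depth : Int) (sup hyp : PySem.Set (List Char)) :
    List (Int × Char) → PySem.Set (List Char) × PySem.Set (List Char)
  | [] => (sup, hyp)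
  | (i, c) :: rest =>
    if c = '[' then bLoop l (depth + 1) sup hyp rest
    else if c = ']' then bLoop l (depth - 1) sup hyp rest
    else
      let t := PySem.List.slice l (some i) (some (i + 3))
      if abaTest t then
        if depth > 0 then bLoop l depth sup (PySem.Set.add hyp t) rest
        else bLoop l depth (PySem.Set.add sup t) hyp rest
      else bLoop l depth sup hyp rest

-- the final set-vs-set check applied to a (supernet, hypernet) pair of triple sets
def bCheck (r : PySem.Set (List Char) × PySem.Set (List Char)) : Bool :=
  r.1.any (fun t => PySem.Set.contains r.2 [t.getD 1 ' ', t.getD 0 ' ', t.getD 1 ' '])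

lemma bLoop_mono (l : List Char) :
    ∀ (todo : List (Int × Char)) (depth : Int) (sup hyp : PySem.Set (List Char)),
      (∀ a ∈ sup, a ∈ (bLoop l depth sup hyp todo).1) ∧
      (∀ b ∈ hyp, b ∈ (bLoop l depth sup hyp todo).2) := by
  intro todo
  induction todo with
  | nil => intro depth sup hyp; simp [bLoop]
  | cons p rest ih =>
    intro depth sup hyp
    obtain ⟨i, c⟩ := p
    simp only [bLoop]
    split_ifs with h1 h2 h3 h4
    · exact ih _ _ _
    · exact ih _ _ _
    · refine ⟨(ih _ _ _).1, fun b hb => (ih _ _ _).2 b ?_⟩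
      exact (PySem.Set.mem_add _ _ _).mpr (Or.inl hb)
    · refine ⟨fun a ha => (ih _ _ _).1 a ?_, (ih _ _ _).2⟩
      exact (PySem.Set.mem_add _ _ _).mpr (Or.inl ha)
    · exact ih _ _ _

lemma depthAt_succ (l : List Char) (j : Nat) (hj : j < l.length) :
    depthAt l (j + 1) =
      depthAt l j + (if l[j] = '[' then 1 else 0) - (if l[j] = ']' then 1 else 0) := by
  have htake : l.take (j + 1) = l.take j ++ [l[j]] := by
    rw [List.take_succ]; simp [List.getElem?_eq_getElem hj]
  simp only [depthAt, htake, List.count_append, List.count_cons, List.count_nil]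
  split_ifs with h1 h2 <;> simp_all <;> omega

lemma extract_eq (l : List Char) (j : Nat) (h : j + 2 < l.length) :
    PySem.List.slice l (some (j : Int)) (some ((j : Int) + 3)) =
      [l[j], l[j + 1], l[j + 2]] := by
  have h3 : ((j : Int) + 3) = ((j + 3 : Nat) : Int) := by push_cast; ring
  rw [h3, PySem.List.slice_natCast]
  have h4 : j + 3 - j = 3 := by omega
  rw [h4]
  apply List.ext_getElem
  · simp; omega
  · intro n h1 h2
    have hn3 : n < 3 := by simpa using h2
    interval_cases n <;>
      simp [List.getElem_take, List.getElem_drop]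

lemma slice_eq_tripleAt (l : List Char) (j : Nat) :
    PySem.List.slice l (some (j : Int)) (some ((j : Int) + 3)) = tripleAt l j := by
  have h3 : ((j : Int) + 3) = ((j : Int) + ((3 : Nat) : Int)) := by push_cast; ring
  rw [h3, PySem.List.slice_natCast_add, tripleAt]

lemma tripleAt_eq (l : List Char) (i : Nat) (h : i + 2 < l.length) :
    tripleAt l i = [l[i], l[i + 1], l[i + 2]] := by
  rw [← slice_eq_tripleAt, extract_eq l i h]

lemma aba_all_alpha (t : List Char) (ht : abaTest t = true) :
    ∀ c ∈ t, PySem.Chars.isalpha c = true := by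
  simp only [abaTest, PySem.Chars.strIsalpha, Bool.and_eq_true, List.all_eq_true] at ht
  exact ht.1.1.2

lemma aba_no_bracket (l : List Char) (i j : Nat) (h : i + 2 < l.length)
    (hij : i ≤ j) (hji : j ≤ i + 2) (hbr : l[j]'(by omega) = '[' ∨ l[j]'(by omega) = ']') :
    abaTest (tripleAt l i) = false := by
  by_contra hne
  have ht : abaTest (tripleAt l i) = true := by
    cases hb : abaTest (tripleAt l i) with
    | false => exact absurd hb hne
    | true => rfl
  have hmem : l[j]'(by omega) ∈ tripleAt l i := by
    rw [tripleAt_eq l i h]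
    have : j = i ∨ j = i + 1 ∨ j = i + 2 := by omega
    rcases this with rfl | rfl | rfl <;> simp
  have := aba_all_alpha _ ht _ hmem
  rcases hbr with hb | hb <;> rw [hb] at this <;> exact absurd this (by decide)

-- stepping the lower bound past a position whose triple is not ABA
lemma okSup_step (l : List Char) (j : Nat) (t : List Char)
    (hb : abaTest (tripleAt l j) = false) : okSup l j t ↔ okSup l (j + 1) t := by
  constructor
  · rintro ⟨i, hji, hlen, rfl, ha, hd⟩
    rcases Nat.eq_or_lt_of_le hji with rfl | hlt
    · rw [ha] at hb; exact absurd hb (by simp)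
    · exact ⟨i, hlt, hlen, rfl, ha, hd⟩
  · rintro ⟨i, hji, hlen, rfl, ha, hd⟩
    exact ⟨i, by omega, hlen, rfl, ha, hd⟩

lemma okHyp_step (l : List Char) (j : Nat) (t : List Char)
    (hb : abaTest (tripleAt l j) = false) : okHyp l j t ↔ okHyp l (j + 1) t := by
  constructor
  · rintro ⟨i, hji, hlen, rfl, ha, hd⟩
    rcases Nat.eq_or_lt_of_le hji with rfl | hlt
    · rw [ha] at hb; exact absurd hb (by simp)
    · exact ⟨i, hlt, hlen, rfl, ha, hd⟩
  · rintro ⟨i, hji, hlen, rfl, ha, hd⟩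
    exact ⟨i, by omega, hlen, rfl, ha, hd⟩

-- splitting the position range at a bracket position j
lemma okSup_split (l : List Char) (s0 j : Nat) (t : List Char) (hj : j < l.length)
    (hs0 : s0 ≤ j) (hbr : l[j] = '[' ∨ l[j] = ']') :
    okSup l s0 t ↔
      (∃ i : Nat, s0 ≤ i ∧ i + 3 ≤ j ∧ i + 2 < l.length ∧ t = tripleAt l i ∧
        abaTest (tripleAt l i) = true ∧ depthAt l i ≤ 0) ∨ okSup l (j + 1) t := by
  constructor
  · rintro ⟨i, hsi, hlen, rfl, ha, hd⟩
    by_cases h1 : i + 3 ≤ j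
    · exact Or.inl ⟨i, hsi, h1, hlen, rfl, ha, hd⟩
    · by_cases h2 : j + 1 ≤ i
      · exact Or.inr ⟨i, h2, hlen, rfl, ha, hd⟩
      · exfalso
        have hcover : i ≤ j ∧ j ≤ i + 2 := by omega
        have := aba_no_bracket l i j hlen hcover.1 hcover.2 hbr
        rw [this] at ha; exact absurd ha (by simp)
  · rintro (⟨i, hsi, _, hlen, rfl, ha, hd⟩ | ⟨i, hji, hlen, rfl, ha, hd⟩)
    · exact ⟨i, hsi, hlen, rfl, ha, hd⟩
    · exact ⟨i, by omega, hlen, rfl, ha, hd⟩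

lemma okHyp_split (l : List Char) (s0 j : Nat) (t : List Char) (hj : j < l.length)
    (hs0 : s0 ≤ j) (hbr : l[j] = '[' ∨ l[j] = ']') :
    okHyp l s0 t ↔
      (∃ i : Nat, s0 ≤ i ∧ i + 3 ≤ j ∧ i + 2 < l.length ∧ t = tripleAt l i ∧
        abaTest (tripleAt l i) = true ∧ 0 < depthAt l i) ∨ okHyp l (j + 1) t := by
  constructor
  · rintro ⟨i, hsi, hlen, rfl, ha, hd⟩
    by_cases h1 : i + 3 ≤ j
    · exact Or.inl ⟨i, hsi, h1, hlen, rfl, ha, hd⟩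
    · by_cases h2 : j + 1 ≤ i
      · exact Or.inr ⟨i, h2, hlen, rfl, ha, hd⟩
      · exfalso
        have hcover : i ≤ j ∧ j ≤ i + 2 := by omega
        have := aba_no_bracket l i j hlen hcover.1 hcover.2 hbr
        rw [this] at ha; exact absurd ha (by simp)
  · rintro (⟨i, hsi, _, hlen, rfl, ha, hd⟩ | ⟨i, hji, hlen, rfl, ha, hd⟩)
    · exact ⟨i, hsi, hlen, rfl, ha, hd⟩
    · exact ⟨i, by omega, hlen, rfl, ha, hd⟩

-- local triple of a window of l = global triple of l
lemma tripleAt_take (l : List Char) (s0 m k : Nat) (h : k + 3 ≤ m) :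
    tripleAt ((l.drop s0).take m) k = tripleAt l (s0 + k) := by
  simp only [tripleAt, List.drop_take, List.drop_drop, List.take_take]
  congr 1
  omega

-- membership after the inner range-fold of segAbas over one segment
lemma mem_abaFoldNat (s : List Char) (t : List Char) :
    ∀ (m : Nat) (found : PySem.Set (List Char)),
      (t ∈ (List.range m).foldl (fun found k =>
          if abaTest (tripleAt s k) then PySem.Set.add found (tripleAt s k) else found) found ↔
        t ∈ found ∨ ∃ k : Nat, k < m ∧ t = tripleAt s k ∧ abaTest (tripleAt s k) = true) := by
  intro m
  induction m with
  | zero => intro found; simp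
  | succ n ih =>
    intro found
    rw [List.range_succ, List.foldl_append]
    simp only [List.foldl_cons, List.foldl_nil]
    by_cases hc : abaTest (tripleAt s n) = true
    · rw [if_pos hc, PySem.Set.mem_add, ih found]
      constructor
      · rintro ((h | ⟨k, hk, ht, hab⟩) | rfl)
        · exact Or.inl h
        · exact Or.inr ⟨k, by omega, ht, hab⟩
        · exact Or.inr ⟨n, by omega, rfl, hc⟩
      · rintro (h | ⟨k, hk, ht, hab⟩)
        · exact Or.inl (Or.inl h)
        · by_cases hkn : k < n
          · exact Or.inl (Or.inr ⟨k, hkn, ht, hab⟩)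
          · have hk' : k = n := by omega
            subst hk'
            exact Or.inr ht
    · rw [if_neg hc, ih found]
      constructor
      · rintro (h | ⟨k, hk, ht, hab⟩)
        · exact Or.inl h
        · exact Or.inr ⟨k, by omega, ht, hab⟩
      · rintro (h | ⟨k, hk, ht, hab⟩)
        · exact Or.inl h
        · by_cases hkn : k < n
          · exact Or.inr ⟨k, hkn, ht, hab⟩
          · have hk' : k = n := by omega
            subst hk'
            exact absurd hab hc

lemma mem_segAbasInner (s : List Char) (found : PySem.Set (List Char)) (t : List Char) :
    (t ∈ (PySem.List.pyRange 0 ((s.length : Int) - 2) 1).foldl (fun found k =>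
        let tt := PySem.List.slice s (some k) (some (k + 3))
        if PySem.Chars.strIsalpha tt && !(tt.getD 0 ' ' == tt.getD 1 ' ') && (tt.getD 0 ' ' == tt.getD 2 ' ')
        then PySem.Set.add found tt else found) found ↔
      t ∈ found ∨ ∃ k : Nat, k + 2 < s.length ∧ t = tripleAt s k ∧ abaTest (tripleAt s k) = true) := by
  by_cases h2 : 2 ≤ s.length
  · have hcast : ((s.length : Int) - 2) = ((s.length - 2 : Nat) : Int) := by
      have hh := Int.natCast_sub h2
      omega
    rw [hcast, PySem.List.pyRange_zero_natCast, List.foldl_map]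
    have hfold : ∀ found : PySem.Set (List Char), ∀ c ∈ List.range (s.length - 2),
        ((fun (found : PySem.Set (List Char)) (k : Int) =>
          let tt := PySem.List.slice s (some k) (some (k + 3))
          if PySem.Chars.strIsalpha tt && !(tt.getD 0 ' ' == tt.getD 1 ' ') && (tt.getD 0 ' ' == tt.getD 2 ' ')
          then PySem.Set.add found tt else found) found ((c : Nat) : Int)) =
        (fun (found : PySem.Set (List Char)) (k : Nat) =>
          if abaTest (tripleAt s k) then PySem.Set.add found (tripleAt s k) else found) found c := by
      intro found c _
      show (let tt := PySem.List.slice s (some (c : Int)) (some ((c : Int) + 3));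
        if PySem.Chars.strIsalpha tt && !(tt.getD 0 ' ' == tt.getD 1 ' ') && (tt.getD 0 ' ' == tt.getD 2 ' ')
        then PySem.Set.add found tt else found) = _
      rw [show (let tt := PySem.List.slice s (some (c : Int)) (some ((c : Int) + 3));
        if PySem.Chars.strIsalpha tt && !(tt.getD 0 ' ' == tt.getD 1 ' ') && (tt.getD 0 ' ' == tt.getD 2 ' ')
        then PySem.Set.add found tt else found) =
        (if abaTest (PySem.List.slice s (some (c : Int)) (some ((c : Int) + 3)))
         then PySem.Set.add found (PySem.List.slice s (some (c : Int)) (some ((c : Int) + 3))) else found)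
        from rfl]
      rw [slice_eq_tripleAt s c]
    rw [PySem.List.foldl_congr_mem _ _ _ _ hfold]
    rw [mem_abaFoldNat s t (s.length - 2) found]
    constructor
    · rintro (h | ⟨k, hk, ht, hab⟩)
      · exact Or.inl h
      · exact Or.inr ⟨k, by omega, ht, hab⟩
    · rintro (h | ⟨k, hk, ht, hab⟩)
      · exact Or.inl h
      · exact Or.inr ⟨k, by omega, ht, hab⟩
  · have hneg : PySem.List.pyRange 0 ((s.length : Int) - 2) 1 = [] := by
      have h01 : s.length = 0 ∨ s.length = 1 := by omega
      rcases h01 with h | h <;> rw [h] <;> decide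
    rw [hneg]
    simp only [List.foldl_nil]
    constructor
    · exact Or.inl
    · rintro (h | ⟨k, hk, _, _⟩)
      · exact h
      · omega

lemma mem_segAbasAux (t : List Char) :
    ∀ (segs : List (List Char)) (found : PySem.Set (List Char)),
      (t ∈ segs.foldl (fun found s =>
        (PySem.List.pyRange 0 ((s.length : Int) - 2) 1).foldl (fun found k =>
          let tt := PySem.List.slice s (some k) (some (k + 3))
          if PySem.Chars.strIsalpha tt && !(tt.getD 0 ' ' == tt.getD 1 ' ') && (tt.getD 0 ' ' == tt.getD 2 ' ')
          then PySem.Set.add found tt else found) found) found ↔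
      t ∈ found ∨ ∃ s ∈ segs, ∃ k : Nat, k + 2 < s.length ∧ t = tripleAt s k ∧ abaTest (tripleAt s k) = true) := by
  intro segs
  induction segs with
  | nil => intro found; simp
  | cons s rest ih =>
    intro found
    rw [List.foldl_cons, ih, mem_segAbasInner]
    constructor
    · rintro ((h | ⟨k, hk, ht, hab⟩) | ⟨s', hs', hk⟩)
      · exact Or.inl h
      · exact Or.inr ⟨s, List.mem_cons_self .., ⟨k, hk, ht, hab⟩⟩
      · exact Or.inr ⟨s', List.mem_cons_of_mem _ hs', hk⟩
    · rintro (h | ⟨s', hs', hk⟩)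
      · exact Or.inl (Or.inl h)
      · rcases List.mem_cons.mp hs' with rfl | hs''
        · exact Or.inl (Or.inr hk)
        · exact Or.inr ⟨s', hs'', hk⟩

lemma mem_segAbas (segs : List (List Char)) (t : List Char) :
    (t ∈ segAbas segs ↔
      ∃ s ∈ segs, ∃ k : Nat, k + 2 < s.length ∧ t = tripleAt s k ∧ abaTest (tripleAt s k) = true) := by
  rw [segAbas, mem_segAbasAux]
  simp [PySem.Set.empty]

lemma mem_segAbas_append_single (segs : List (List Char)) (s : List Char) (t : List Char) :
    (t ∈ segAbas (segs ++ [s]) ↔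
      t ∈ segAbas segs ∨ ∃ k : Nat, k + 2 < s.length ∧ t = tripleAt s k ∧ abaTest (tripleAt s k) = true) := by
  rw [mem_segAbas, mem_segAbas]
  constructor
  · rintro ⟨s', hs', hk⟩
    rcases List.mem_append.mp hs' with h | h
    · exact Or.inl ⟨s', h, hk⟩
    · rcases List.mem_singleton.mp h with rfl
      exact Or.inr hk
  · rintro (⟨s', hs', hk⟩ | hk)
    · exact ⟨s', List.mem_append_left _ hs', hk⟩
    · exact ⟨s, List.mem_append_right _ (List.mem_singleton.mpr rfl), hk⟩

-- stepping past an ABA position that the current branch does not store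
lemma okSup_stepD (l : List Char) (j : Nat) (t : List Char) (hd : 0 < depthAt l j) :
    okSup l j t ↔ okSup l (j + 1) t := by
  constructor
  · rintro ⟨i, hji, hlen, rfl, ha, hdp⟩
    rcases Nat.eq_or_lt_of_le hji with rfl | hlt
    · omega
    · exact ⟨i, hlt, hlen, rfl, ha, hdp⟩
  · rintro ⟨i, hji, hlen, rfl, ha, hdp⟩
    exact ⟨i, by omega, hlen, rfl, ha, hdp⟩

lemma okHyp_stepD (l : List Char) (j : Nat) (t : List Char) (hd : depthAt l j ≤ 0) :
    okHyp l j t ↔ okHyp l (j + 1) t := by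
  constructor
  · rintro ⟨i, hji, hlen, rfl, ha, hdp⟩
    rcases Nat.eq_or_lt_of_le hji with rfl | hlt
    · omega
    · exact ⟨i, hlt, hlen, rfl, ha, hdp⟩
  · rintro ⟨i, hji, hlen, rfl, ha, hdp⟩
    exact ⟨i, by omega, hlen, rfl, ha, hdp⟩

-- peeling off the stored ABA position itself
lemma okSup_peel (l : List Char) (j : Nat) (t : List Char) (hj2 : j + 2 < l.length)
    (ha : abaTest (tripleAt l j) = true) (hd : depthAt l j ≤ 0) :
    okSup l j t ↔ t = tripleAt l j ∨ okSup l (j + 1) t := by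
  constructor
  · rintro ⟨i, hji, hlen, rfl, ha', hdp⟩
    rcases Nat.eq_or_lt_of_le hji with rfl | hlt
    · exact Or.inl rfl
    · exact Or.inr ⟨i, hlt, hlen, rfl, ha', hdp⟩
  · rintro (rfl | ⟨i, hji, hlen, rfl, ha', hdp⟩)
    · exact ⟨j, le_refl j, hj2, rfl, ha, hd⟩
    · exact ⟨i, by omega, hlen, rfl, ha', hdp⟩

lemma okHyp_peel (l : List Char) (j : Nat) (t : List Char) (hj2 : j + 2 < l.length)
    (ha : abaTest (tripleAt l j) = true) (hd : 0 < depthAt l j) :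
    okHyp l j t ↔ t = tripleAt l j ∨ okHyp l (j + 1) t := by
  constructor
  · rintro ⟨i, hji, hlen, rfl, ha', hdp⟩
    rcases Nat.eq_or_lt_of_le hji with rfl | hlt
    · exact Or.inl rfl
    · exact Or.inr ⟨i, hlt, hlen, rfl, ha', hdp⟩
  · rintro (rfl | ⟨i, hji, hlen, rfl, ha', hdp⟩)
    · exact ⟨j, le_refl j, hj2, rfl, ha, hd⟩
    · exact ⟨i, by omega, hlen, rfl, ha', hdp⟩

-- membership characterisation of the flat scan's two sets
lemma bLoop_mem (l : List Char) :
    ∀ (cs : List Char) (j : Nat) (sup hyp : PySem.Set (List Char)),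
      cs = (l.take (l.length - 2)).drop j →
      (∀ t, t ∈ (bLoop l (depthAt l j) sup hyp (PySem.List.enumerate cs (j : Int))).1 ↔
        t ∈ sup ∨ okSup l j t) ∧
      (∀ t, t ∈ (bLoop l (depthAt l j) sup hyp (PySem.List.enumerate cs (j : Int))).2 ↔
        t ∈ hyp ∨ okHyp l j t) := by
  intro cs
  induction cs with
  | nil =>
    intro j sup hyp hcs
    have hje : l.length - 2 ≤ j := by
      have h1 := List.drop_eq_nil_iff.mp hcs.symm
      rw [List.length_take] at h1
      omega
    have hnoSup : ∀ t, ¬ okSup l j t := by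
      rintro t ⟨i, hji, hlen, _, _, _⟩; omega
    have hnoHyp : ∀ t, ¬ okHyp l j t := by
      rintro t ⟨i, hji, hlen, _, _, _⟩; omega
    simp only [PySem.List.enumerate_nil, bLoop]
    exact ⟨fun t => by simp [hnoSup t], fun t => by simp [hnoHyp t]⟩
  | cons c cs' ih =>
    intro j sup hyp hcs
    have hlen' : j < (l.take (l.length - 2)).length := by
      rcases Nat.lt_or_ge j (l.take (l.length - 2)).length with hlt | hge
      · exact hlt
      · rw [List.drop_eq_nil_of_le hge] at hcs
        exact absurd hcs (List.cons_ne_nil _ _)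
    rw [List.length_take] at hlen'
    have hjm : j < l.length - 2 := lt_of_lt_of_le hlen' (min_le_left _ _)
    have hjl : j < l.length := by omega
    have hj2 : j + 2 < l.length := by omega
    have hc : c = l[j] := by
      have hh := congrArg List.head? hcs
      rw [List.head?_drop, List.getElem?_take_of_lt hjm, List.getElem?_eq_getElem hjl] at hh
      simpa using hh
    have hcs' : cs' = (l.take (l.length - 2)).drop (j + 1) := by
      have ht := congrArg List.tail hcs
      rwa [List.tail_drop] at ht
    have hcast : ((j : Int) + 1) = ((j + 1 : Nat) : Int) := by push_cast; ring
    rw [PySem.List.enumerate_cons, hcast]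
    by_cases hbo : c = '['
    · have heq : depthAt l (j + 1) = depthAt l j + 1 := by
        rw [depthAt_succ l j hjl, ← hc, hbo]; simp
      have hbf : abaTest (tripleAt l j) = false :=
        aba_no_bracket l j j hj2 (le_refl j) (by omega) (Or.inl (by rw [← hc, hbo]))
      simp only [bLoop, if_pos hbo]
      rw [show depthAt l j + 1 = depthAt l (j + 1) from heq.symm]
      obtain ⟨ih1, ih2⟩ := ih (j + 1) sup hyp hcs'
      exact ⟨fun t => (ih1 t).trans (or_congr Iff.rfl (okSup_step l j t hbf).symm),
             fun t => (ih2 t).trans (or_congr Iff.rfl (okHyp_step l j t hbf).symm)⟩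
    · by_cases hbc : c = ']'
      · have heq : depthAt l (j + 1) = depthAt l j - 1 := by
          rw [depthAt_succ l j hjl, ← hc, hbc]; simp
        have hbf : abaTest (tripleAt l j) = false :=
          aba_no_bracket l j j hj2 (le_refl j) (by omega) (Or.inr (by rw [← hc, hbc]))
        simp only [bLoop, if_neg hbo, if_pos hbc]
        rw [show depthAt l j - 1 = depthAt l (j + 1) from heq.symm]
        obtain ⟨ih1, ih2⟩ := ih (j + 1) sup hyp hcs'
        exact ⟨fun t => (ih1 t).trans (or_congr Iff.rfl (okSup_step l j t hbf).symm),
               fun t => (ih2 t).trans (or_congr Iff.rfl (okHyp_step l j t hbf).symm)⟩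
      · have heq : depthAt l (j + 1) = depthAt l j := by
          rw [depthAt_succ l j hjl, ← hc]
          simp [hbo, hbc]
        simp only [bLoop, if_neg hbo, if_neg hbc]
        by_cases haba : abaTest (PySem.List.slice l (some (j : Int)) (some ((j : Int) + 3))) = true
        · rw [if_pos haba]
          have habaT : abaTest (tripleAt l j) = true := by
            rw [← slice_eq_tripleAt]; exact haba
          rw [slice_eq_tripleAt l j]
          by_cases hd : depthAt l j > 0
          · rw [if_pos hd]
            rw [show depthAt l j = depthAt l (j + 1) from heq.symm]
            obtain ⟨ih1, ih2⟩ := ih (j + 1) sup (PySem.Set.add hyp (tripleAt l j)) hcs'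
            refine ⟨fun t => ?_, fun t => ?_⟩
            · rw [ih1 t, okSup_stepD l j t (by omega)]
            · rw [ih2 t, PySem.Set.mem_add, okHyp_peel l j t hj2 habaT (by omega)]
              tauto
          · rw [if_neg hd]
            rw [show depthAt l j = depthAt l (j + 1) from heq.symm]
            obtain ⟨ih1, ih2⟩ := ih (j + 1) (PySem.Set.add sup (tripleAt l j)) hyp hcs'
            refine ⟨fun t => ?_, fun t => ?_⟩
            · rw [ih1 t, PySem.Set.mem_add, okSup_peel l j t hj2 habaT (by omega)]
              tauto
            · rw [ih2 t, okHyp_stepD l j t (by omega)]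
        · rw [if_neg haba]
          have hbf : abaTest (tripleAt l j) = false := by
            rw [← slice_eq_tripleAt]
            exact Bool.eq_false_iff.mpr haba
          rw [show depthAt l j = depthAt l (j + 1) from heq.symm]
          obtain ⟨ih1, ih2⟩ := ih (j + 1) sup hyp hcs'
          exact ⟨fun t => (ih1 t).trans (or_congr Iff.rfl (okSup_step l j t hbf).symm),
                 fun t => (ih2 t).trans (or_congr Iff.rfl (okHyp_step l j t hbf).symm)⟩

lemma skip_mid {A B C : Prop} (hB : ¬ B) : (A ∨ C) ↔ A ∨ (B ∨ C) := by
  constructor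
  · rintro (h | h)
    · exact Or.inl h
    · exact Or.inr (Or.inr h)
  · rintro (h | h | h)
    · exact Or.inl h
    · exact absurd h hB
    · exact Or.inr h

-- the ABA triples of the window l[s0:j] are the global ABA triples starting in [s0, j-3]
lemma seg_triples (l : List Char) (s0 j : Nat) (hs0 : s0 ≤ j) (hjl : j ≤ l.length) (t : List Char) :
    (∃ k : Nat, k + 2 < ((l.drop s0).take (j - s0)).length ∧ t = tripleAt ((l.drop s0).take (j - s0)) k ∧
      abaTest (tripleAt ((l.drop s0).take (j - s0)) k) = true) ↔
    (∃ i : Nat, s0 ≤ i ∧ i + 3 ≤ j ∧ t = tripleAt l i ∧ abaTest (tripleAt l i) = true) := by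
  have hlen : ((l.drop s0).take (j - s0)).length = j - s0 := by
    rw [List.length_take, List.length_drop]; omega
  constructor
  · rintro ⟨k, hk, ht, hab⟩
    rw [hlen] at hk
    rw [tripleAt_take l s0 (j - s0) k (by omega)] at ht hab
    exact ⟨s0 + k, by omega, by omega, ht, hab⟩
  · rintro ⟨i, hsi, hij, ht, hab⟩
    refine ⟨i - s0, ?_, ?_, ?_⟩
    · rw [hlen]; omega
    · rw [tripleAt_take l s0 (j - s0) (i - s0) (by omega), show s0 + (i - s0) = i from by omega]
      exact ht
    · rw [tripleAt_take l s0 (j - s0) (i - s0) (by omega), show s0 + (i - s0) = i from by omega]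
      exact hab

-- membership characterisation of B's segment split + per-family scan
lemma segSplit_mem (l : List Char) :
    ∀ (cs : List Char) (j s0 : Nat) (supers hypers : List (List Char)) (seg : List Char),
      cs = l.drop j → s0 ≤ j → s0 ≤ l.length → seg = (l.drop s0).take (j - s0) →
      (∀ p : Nat, s0 ≤ p → p ≤ j → depthAt l p = depthAt l j) →
      (∀ t, t ∈ segAbas (segSplit supers hypers seg (depthAt l j) cs).1 ↔
        t ∈ segAbas supers ∨ okSup l s0 t) ∧
      (∀ t, t ∈ segAbas (segSplit supers hypers seg (depthAt l j) cs).2 ↔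
        t ∈ segAbas hypers ∨ okHyp l s0 t) := by
  intro cs
  induction cs with
  | nil =>
    intro j s0 supers hypers seg hcs hs0 hs0l hseg hdc
    have hje : l.length ≤ j := by
      have := List.drop_eq_nil_iff.mp hcs.symm
      omega
    have hseg' : seg = (l.drop s0).take (l.length - s0) := by
      have h1 : (l.drop s0).take (j - s0) = l.drop s0 :=
        List.take_of_length_le (by rw [List.length_drop]; omega)
      have h2 : (l.drop s0).take (l.length - s0) = l.drop s0 :=
        List.take_of_length_le (by rw [List.length_drop])
      rw [hseg, h1, h2]
    have hsegt := seg_triples l s0 l.length hs0l (le_refl _) 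
    simp only [segSplit]
    by_cases hd : depthAt l j > 0
    · rw [if_pos hd]
      refine ⟨fun t => ?_, fun t => ?_⟩
      · have hno : ¬ okSup l s0 t := by
          rintro ⟨i, h1, h2, _, _, h5⟩
          have := hdc i h1 (by omega)
          omega
        exact (or_iff_left hno).symm
      · rw [mem_segAbas_append_single, hseg', hsegt t]
        have hBB : (∃ i, s0 ≤ i ∧ i + 3 ≤ l.length ∧ t = tripleAt l i ∧ abaTest (tripleAt l i) = true) ↔
            okHyp l s0 t := by
          constructor
          · rintro ⟨i, h1, h2, h3, h4⟩
            refine ⟨i, h1, by omega, h3, h4, ?_⟩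
            have := hdc i h1 (by omega)
            omega
          · rintro ⟨i, h1, h2, h3, h4, _⟩
            exact ⟨i, h1, by omega, h3, h4⟩
        rw [hBB]
    · rw [if_neg hd]
      refine ⟨fun t => ?_, fun t => ?_⟩
      · rw [mem_segAbas_append_single, hseg', hsegt t]
        have hBB : (∃ i, s0 ≤ i ∧ i + 3 ≤ l.length ∧ t = tripleAt l i ∧ abaTest (tripleAt l i) = true) ↔
            okSup l s0 t := by
          constructor
          · rintro ⟨i, h1, h2, h3, h4⟩
            refine ⟨i, h1, by omega, h3, h4, ?_⟩
            have := hdc i h1 (by omega)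
            omega
          · rintro ⟨i, h1, h2, h3, h4, _⟩
            exact ⟨i, h1, by omega, h3, h4⟩
        rw [hBB]
      · have hno : ¬ okHyp l s0 t := by
          rintro ⟨i, h1, h2, _, _, h5⟩
          have := hdc i h1 (by omega)
          omega
        exact (or_iff_left hno).symm
  | cons c rest ih =>
    intro j s0 supers hypers seg hcs hs0 hs0l hseg hdc
    have hjl : j < l.length := by
      rcases Nat.lt_or_ge j l.length with h | h
      · exact h
      · rw [List.drop_eq_nil_of_le h] at hcs
        exact absurd hcs (List.cons_ne_nil _ _)
    have hc : c = l[j] := by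
      have hh := congrArg List.head? hcs
      rw [List.head?_drop, List.getElem?_eq_getElem hjl] at hh
      simpa using hh
    have hrest : rest = l.drop (j + 1) := by
      have ht := congrArg List.tail hcs
      rwa [List.tail_drop] at ht
    by_cases hbr : c = '[' ∨ c = ']'
    · simp only [segSplit, if_pos hbr]
      have hbr' : l[j] = '[' ∨ l[j] = ']' := by
        rcases hbr with h | h
        · exact Or.inl (by rw [← hc, h])
        · exact Or.inr (by rw [← hc, h])
      have hdep : depthAt l (j + 1) = depthAt l j + (if c = '[' then 1 else -1) := by
        rw [depthAt_succ l j hjl, ← hc]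
        rcases hbr with h | h <;> subst h
        · simp
        · simp
          omega
      have hdc1 : ∀ p : Nat, j + 1 ≤ p → p ≤ j + 1 → depthAt l p = depthAt l (j + 1) := by
        intro p h1 h2
        have hp : p = j + 1 := by omega
        rw [hp]
      have hsegt := seg_triples l s0 j hs0 (by omega)
      by_cases hd : depthAt l j > 0
      · rw [if_pos hd]
        rw [show depthAt l j + (if c = '[' then 1 else -1) = depthAt l (j + 1) from hdep.symm]
        obtain ⟨ih1, ih2⟩ := ih (j + 1) (j + 1) supers (hypers ++ [seg]) []
          hrest (le_refl _) (by omega) (by simp) hdc1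
        refine ⟨fun t => ?_, fun t => ?_⟩
        · rw [ih1 t, okSup_split l s0 j t hjl hs0 hbr']
          have hno : ¬ ∃ i : Nat, s0 ≤ i ∧ i + 3 ≤ j ∧ i + 2 < l.length ∧ t = tripleAt l i ∧
              abaTest (tripleAt l i) = true ∧ depthAt l i ≤ 0 := by
            rintro ⟨i, h1, h2, _, _, _, h6⟩
            have := hdc i h1 (by omega)
            omega
          exact skip_mid hno
        · rw [ih2 t, mem_segAbas_append_single, hseg, okHyp_split l s0 j t hjl hs0 hbr', hsegt t]
          have hBB : (∃ i, s0 ≤ i ∧ i + 3 ≤ j ∧ t = tripleAt l i ∧ abaTest (tripleAt l i) = true) ↔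
              (∃ i : Nat, s0 ≤ i ∧ i + 3 ≤ j ∧ i + 2 < l.length ∧ t = tripleAt l i ∧
                abaTest (tripleAt l i) = true ∧ 0 < depthAt l i) := by
            constructor
            · rintro ⟨i, h1, h2, h3, h4⟩
              refine ⟨i, h1, h2, by omega, h3, h4, ?_⟩
              have := hdc i h1 (by omega)
              omega
            · rintro ⟨i, h1, h2, _, h4, h5, _⟩
              exact ⟨i, h1, h2, h4, h5⟩
          rw [hBB]
          exact or_assoc
      · rw [if_neg hd]
        rw [show depthAt l j + (if c = '[' then 1 else -1) = depthAt l (j + 1) from hdep.symm]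
        obtain ⟨ih1, ih2⟩ := ih (j + 1) (j + 1) (supers ++ [seg]) hypers []
          hrest (le_refl _) (by omega) (by simp) hdc1
        refine ⟨fun t => ?_, fun t => ?_⟩
        · rw [ih1 t, mem_segAbas_append_single, hseg, okSup_split l s0 j t hjl hs0 hbr', hsegt t]
          have hBB : (∃ i, s0 ≤ i ∧ i + 3 ≤ j ∧ t = tripleAt l i ∧ abaTest (tripleAt l i) = true) ↔
              (∃ i : Nat, s0 ≤ i ∧ i + 3 ≤ j ∧ i + 2 < l.length ∧ t = tripleAt l i ∧
                abaTest (tripleAt l i) = true ∧ depthAt l i ≤ 0) := by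
            constructor
            · rintro ⟨i, h1, h2, h3, h4⟩
              refine ⟨i, h1, h2, by omega, h3, h4, ?_⟩
              have := hdc i h1 (by omega)
              omega
            · rintro ⟨i, h1, h2, _, h4, h5, _⟩
              exact ⟨i, h1, h2, h4, h5⟩
          rw [hBB]
          exact or_assoc
        · rw [ih2 t, okHyp_split l s0 j t hjl hs0 hbr']
          have hno : ¬ ∃ i : Nat, s0 ≤ i ∧ i + 3 ≤ j ∧ i + 2 < l.length ∧ t = tripleAt l i ∧
              abaTest (tripleAt l i) = true ∧ 0 < depthAt l i := by
            rintro ⟨i, h1, h2, _, _, _, h6⟩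
            have := hdc i h1 (by omega)
            omega
          exact skip_mid hno
    · simp only [segSplit, if_neg hbr]
      have hbo : c ≠ '[' := fun h => hbr (Or.inl h)
      have hbc : c ≠ ']' := fun h => hbr (Or.inr h)
      have hdep : depthAt l (j + 1) = depthAt l j := by
        rw [depthAt_succ l j hjl, ← hc]
        simp [hbo, hbc]
      have hseg1 : seg ++ [c] = (l.drop s0).take (j + 1 - s0) := by
        rw [hseg, hc, show j + 1 - s0 = (j - s0) + 1 from by omega, List.take_succ]
        congr 1
        rw [List.getElem?_drop, show s0 + (j - s0) = j from by omega,
          List.getElem?_eq_getElem hjl]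
        rfl
      have hdc' : ∀ p : Nat, s0 ≤ p → p ≤ j + 1 → depthAt l p = depthAt l (j + 1) := by
        intro p h1 h2
        rcases Nat.lt_or_ge p (j + 1) with hp | hp
        · exact (hdc p h1 (by omega)).trans hdep.symm
        · have hp' : p = j + 1 := by omega
          rw [hp']
      rw [show depthAt l j = depthAt l (j + 1) from hdep.symm]
      exact ih (j + 1) s0 supers hypers (seg ++ [c]) hrest (by omega) (by omega) hseg1 hdc'

-- B's result equals the flat scan's set comparison
lemma alt_eq_bCheck (ip : String) :
    ssl_support_alt ip =
      bCheck (bLoop ip.toList 0 PySem.Set.empty PySem.Set.empty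
        (PySem.List.enumerate (ip.toList.take (ip.toList.length - 2)) 0)) := by
  have hbool : ∀ a b : Bool, (a = true ↔ b = true) → a = b := by decide
  have hd0 : depthAt ip.toList 0 = 0 := by simp [depthAt]
  have hdc0 : ∀ p : Nat, 0 ≤ p → p ≤ 0 → depthAt ip.toList p = depthAt ip.toList 0 := by
    intro p _ h2
    have hp : p = 0 := by omega
    rw [hp]
  obtain ⟨hs1, hs2⟩ := segSplit_mem ip.toList ip.toList 0 0 [] [] []
    (by simp) (le_refl 0) (Nat.zero_le _) (by simp) hdc0
  obtain ⟨hb1, hb2⟩ := bLoop_mem ip.toList (ip.toList.take (ip.toList.length - 2)) 0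
    PySem.Set.empty PySem.Set.empty (by simp)
  rw [hd0] at hs1 hs2 hb1 hb2
  simp only [Nat.cast_zero] at hb1 hb2
  have hS : ∀ t, t ∈ segAbas (segSplit [] [] [] 0 ip.toList).1 ↔
      t ∈ (bLoop ip.toList 0 PySem.Set.empty PySem.Set.empty
        (PySem.List.enumerate (ip.toList.take (ip.toList.length - 2)) 0)).1 := by
    intro t
    rw [hs1 t, hb1 t, mem_segAbas]
    simp [PySem.Set.empty]
  have hH : ∀ t, t ∈ segAbas (segSplit [] [] [] 0 ip.toList).2 ↔
      t ∈ (bLoop ip.toList 0 PySem.Set.empty PySem.Set.empty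
        (PySem.List.enumerate (ip.toList.take (ip.toList.length - 2)) 0)).2 := by
    intro t
    rw [hs2 t, hb2 t, mem_segAbas]
    simp [PySem.Set.empty]
  show (segAbas (segSplit [] [] [] 0 ip.toList).1).any
      (fun t => PySem.Set.contains (segAbas (segSplit [] [] [] 0 ip.toList).2)
        [t.getD 1 ' ', t.getD 0 ' ', t.getD 1 ' ']) = _
  simp only [bCheck]
  apply hbool
  simp only [List.any_eq_true]
  constructor
  · rintro ⟨t, ht, hp⟩
    refine ⟨t, (hS t).mp ht, ?_⟩
    rw [PySem.Set.contains_iff] at hp ⊢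
    exact (hH _).mp hp
  · rintro ⟨t, ht, hp⟩
    refine ⟨t, (hS t).mpr ht, ?_⟩
    rw [PySem.Set.contains_iff] at hp ⊢
    exact (hH _).mpr hp

lemma main_lemma (l : List Char)
    (hpre : ∀ i : Nat, i < l.length - 2 → l.getD i ' ' = ']' →
      (l.take i).count ']' < (l.take i).count '[') :
    ∀ (cs : List Char) (j : Nat) (stack : List Char) (sup hyp : PySem.Set (List Char)),
      cs = (l.take (l.length - 2)).drop j →
      (stack.length : Int) = depthAt l j →
      SInv sup hyp →
      aLoop l stack sup hyp (PySem.List.enumerate cs (j : Int)) =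
        bCheck (bLoop l (depthAt l j) sup hyp (PySem.List.enumerate cs (j : Int))) := by
  intro cs
  induction cs with
  | nil =>
    intro j stack sup hyp hcs hstack hinv
    simp only [PySem.List.enumerate_nil, aLoop, bLoop, bCheck]
    symm
    simp only [List.any_eq_false]
    intro t ht
    obtain ⟨hsupSh, _, hnomatch⟩ := hinv
    obtain ⟨x, y, rfl⟩ := hsupSh t ht
    have hnm := hnomatch _ ht
    simp only [invert_pattern] at hnm
    simp only [List.getD, List.getElem?_cons_zero, List.getElem?_cons_succ, Option.getD_some]
    rw [PySem.Set.contains_iff]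
    exact hnm
  | cons c cs' ih =>
    intro j stack sup hyp hcs hstack hinv
    have hlen' : j < (l.take (l.length - 2)).length := by
      rcases Nat.lt_or_ge j (l.take (l.length - 2)).length with hlt | hge
      · exact hlt
      · rw [List.drop_eq_nil_of_le hge] at hcs
        exact absurd hcs (List.cons_ne_nil _ _)
    rw [List.length_take] at hlen'
    have hjm : j < l.length - 2 := lt_of_lt_of_le hlen' (min_le_left _ _)
    have hjl : j < l.length := by omega
    have hj2 : j + 2 < l.length := by omega
    have hc : c = l[j] := by
      have hh := congrArg List.head? hcs
      rw [List.head?_drop, List.getElem?_take_of_lt hjm, List.getElem?_eq_getElem hjl] at hh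
      simpa using hh
    have hcs' : cs' = (l.take (l.length - 2)).drop (j + 1) := by
      have ht := congrArg List.tail hcs
      rwa [List.tail_drop] at ht
    have hcast : ((j : Int) + 1) = ((j + 1 : Nat) : Int) := by push_cast; ring
    rw [PySem.List.enumerate_cons, hcast]
    by_cases hbo : c = '['
    · -- push
      have heq : depthAt l (j + 1) = depthAt l j + 1 := by
        rw [depthAt_succ l j hjl, ← hc, hbo]; simp
      simp only [aLoop, bLoop, if_pos hbo]
      rw [show depthAt l j + 1 = depthAt l (j + 1) from heq.symm]
      exact ih (j + 1) (stack ++ [c]) sup hyp hcs' (by simp; omega) hinv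
    · by_cases hbc : c = ']'
      · -- pop; Pre gives a nonempty stack
        have hcount := hpre j hjm (by rw [List.getD_eq_getElem _ _ hjl, ← hc, hbc])
        have hdpos : 1 ≤ depthAt l j := by simp only [depthAt]; omega
        have heq : depthAt l (j + 1) = depthAt l j - 1 := by
          rw [depthAt_succ l j hjl, ← hc, hbc]; simp
        simp only [aLoop, bLoop, if_neg hbo, if_pos hbc]
        rw [show depthAt l j - 1 = depthAt l (j + 1) from heq.symm]
        refine ih (j + 1) stack.dropLast sup hyp hcs' ?_ hinv
        rw [List.length_dropLast]
        omega
      · -- ordinary character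
        have heq : depthAt l (j + 1) = depthAt l j := by
          rw [depthAt_succ l j hjl, ← hc]
          simp [hbo, hbc]
        simp only [aLoop, bLoop, if_neg hbo, if_neg hbc]
        by_cases haba : abaTest (PySem.List.slice l (some (j : Int)) (some ((j : Int) + 3))) = true
        · have hsh : ∃ x y, x ≠ y ∧
              PySem.List.slice l (some (j : Int)) (some ((j : Int) + 3)) = [x, y, x] := by
            rw [extract_eq l j hj2] at haba ⊢
            simp only [abaTest, List.getD, List.getElem?_cons_zero, List.getElem?_cons_succ,
              Option.getD_some, Bool.and_eq_true, Bool.not_eq_true', beq_eq_false_iff_ne,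
              beq_iff_eq] at haba
            exact ⟨l[j], l[j + 1], haba.1.2, by rw [haba.2]⟩
          obtain ⟨x, y, hxy, hexy⟩ := hsh
          rw [if_pos haba]
          rw [if_pos haba]
          obtain ⟨hsupSh, hhypSh, hnomatch⟩ := hinv
          by_cases hpos : 0 < stack.length
          · have hd : 0 < depthAt l j := by omega
            rw [if_pos hpos, if_pos hd]
            by_cases hmem : invert_pattern (PySem.List.slice l (some (j:Int)) (some ((j:Int) + 3))) ∈ sup
            · have hcont : PySem.Set.contains sup
                  (invert_pattern (PySem.List.slice l (some (j:Int)) (some ((j:Int) + 3)))) = true :=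
                (PySem.Set.contains_iff _ _).mpr hmem
              rw [if_pos hcont]
              symm
              simp only [bCheck, List.any_eq_true]
              refine ⟨invert_pattern (PySem.List.slice l (some (j:Int)) (some ((j:Int) + 3))),
                (bLoop_mono l _ _ _ _).1 _ hmem, ?_⟩
              rw [PySem.Set.contains_iff]
              have hback : [(invert_pattern (PySem.List.slice l (some (j:Int)) (some ((j:Int) + 3)))).getD 1 ' ',
                  (invert_pattern (PySem.List.slice l (some (j:Int)) (some ((j:Int) + 3)))).getD 0 ' ',
                  (invert_pattern (PySem.List.slice l (some (j:Int)) (some ((j:Int) + 3)))).getD 1 ' '] =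
                  PySem.List.slice l (some (j:Int)) (some ((j:Int) + 3)) := by
                rw [hexy]; simp [invert_pattern, List.getD]
              rw [hback]
              exact (bLoop_mono l _ _ _ _).2 _ ((PySem.Set.mem_add _ _ _).mpr (Or.inr rfl))
            · have hcf : ¬ (PySem.Set.contains sup
                  (invert_pattern (PySem.List.slice l (some (j:Int)) (some ((j:Int) + 3)))) = true) := by
                rw [PySem.Set.contains_iff]; exact hmem
              rw [if_neg hcf]
              rw [show depthAt l j = depthAt l (j + 1) from heq.symm]
              refine ih (j + 1) stack sup
                (PySem.Set.add hyp (PySem.List.slice l (some (j:Int)) (some ((j:Int) + 3))))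
                hcs' (by rw [heq]; exact hstack) ?_
              refine ⟨hsupSh, ?_, ?_⟩
              · intro b hb
                rcases (PySem.Set.mem_add _ _ _).mp hb with hb' | hb'
                · exact hhypSh b hb'
                · exact ⟨x, y, by rw [hb', hexy]⟩
              · intro a ha hmem2
                rcases (PySem.Set.mem_add _ _ _).mp hmem2 with h2 | h2
                · exact hnomatch a ha h2
                · obtain ⟨p, q, rfl⟩ := hsupSh a ha
                  rw [hexy] at h2
                  simp only [invert_pattern, List.cons.injEq, and_true] at h2
                  obtain ⟨hq, hp, -⟩ := h2
                  apply hmem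
                  rw [hexy]
                  simp only [invert_pattern]
                  rw [← hq, ← hp]
                  exact ha
          · have hd : ¬ (0 < depthAt l j) := by omega
            rw [if_neg hpos, if_neg hd]
            by_cases hmem : invert_pattern (PySem.List.slice l (some (j:Int)) (some ((j:Int) + 3))) ∈ hyp
            · have hcont : PySem.Set.contains hyp
                  (invert_pattern (PySem.List.slice l (some (j:Int)) (some ((j:Int) + 3)))) = true :=
                (PySem.Set.contains_iff _ _).mpr hmem
              rw [if_pos hcont]
              symm
              simp only [bCheck, List.any_eq_true]
              refine ⟨PySem.List.slice l (some (j:Int)) (some ((j:Int) + 3)),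
                (bLoop_mono l _ _ _ _).1 _ ((PySem.Set.mem_add _ _ _).mpr (Or.inr rfl)), ?_⟩
              rw [PySem.Set.contains_iff]
              have hfwd : [(PySem.List.slice l (some (j:Int)) (some ((j:Int) + 3))).getD 1 ' ',
                  (PySem.List.slice l (some (j:Int)) (some ((j:Int) + 3))).getD 0 ' ',
                  (PySem.List.slice l (some (j:Int)) (some ((j:Int) + 3))).getD 1 ' '] =
                  invert_pattern (PySem.List.slice l (some (j:Int)) (some ((j:Int) + 3))) := by
                rw [hexy]; simp [invert_pattern, List.getD]
              rw [hfwd]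
              exact (bLoop_mono l _ _ _ _).2 _ hmem
            · have hcf : ¬ (PySem.Set.contains hyp
                  (invert_pattern (PySem.List.slice l (some (j:Int)) (some ((j:Int) + 3)))) = true) := by
                rw [PySem.Set.contains_iff]; exact hmem
              rw [if_neg hcf]
              rw [show depthAt l j = depthAt l (j + 1) from heq.symm]
              refine ih (j + 1) stack
                (PySem.Set.add sup (PySem.List.slice l (some (j:Int)) (some ((j:Int) + 3)))) hyp
                hcs' (by rw [heq]; exact hstack) ?_
              refine ⟨?_, hhypSh, ?_⟩
              · intro a ha
                rcases (PySem.Set.mem_add _ _ _).mp ha with ha' | ha'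
                · exact hsupSh a ha'
                · exact ⟨x, y, by rw [ha', hexy]⟩
              · intro a ha
                rcases (PySem.Set.mem_add _ _ _).mp ha with ha' | ha'
                · exact hnomatch a ha'
                · rw [ha']
                  exact hmem
        · rw [if_neg haba]
          rw [if_neg haba]
          rw [show depthAt l j = depthAt l (j + 1) from heq.symm]
          exact ih (j + 1) stack sup hyp hcs' (by rw [heq]; exact hstack) hinv

-- ===== VERDICT (by name: the statement is the Claim_ definition above) =====
theorem ssl_support_spec : Claim_equal_ssl_support := by
  intro ip _ hpre
  unfold Spec_ssl_support ssl_support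
  rw [PySem.List.slice_to_neg_ofNat ip.toList 2 (by omega)]
  have h := main_lemma ip.toList hpre (ip.toList.take (ip.toList.length - 2)) 0 []
    PySem.Set.empty PySem.Set.empty (by simp) (by simp [depthAt])
    ⟨by simp [PySem.Set.empty], by simp [PySem.Set.empty], by simp [PySem.Set.empty]⟩
  simp only [Nat.cast_zero] at h
  have hd0 : depthAt ip.toList 0 = 0 := by simp [depthAt]
  rw [hd0] at h
  rw [h, ← alt_eq_bCheck]
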